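-- pv_equiv track=rewrite | github.com/pawlowiczf/ASD-2022-2023 | Egzaminy, kolokwia - poprzednie lata/2019-2020/Kolokwium 1/1.1 - prettySort.py | convert
-- ===== SOURCE A (Python) =====
-- def convert(n):
--     A = [0] * 10
--     temp = n
--     while temp > 0:
--         A[temp % 10] += 1
--         temp //= 10
--     single = 0
--     many = 0
--     for d in A:
--         if d == 1:
--             single += 1
--         elif d > 1:
--             many += 1
--     return n, single, many
-- ===== SOURCE B (Python) =====
-- def convert(n):
--     seen = set()
--     multi = set()
--     temp = n
--     while temp > 0:
--         d = temp % 10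
--         if d in seen:
--             multi.add(d)
--         else:
--             seen.add(d)
--         temp //= 10
--     return n, len(seen) - len(multi), len(multi)
-- ===== Notes on version B (the rewrite author's own statement) =====
-- stated objective: simpler
-- what changed: Replaces the ten-slot count array and the second classification pass over it with two sets (seen/multi) maintained in the single digit loop; single = len(seen)-len(multi), many = len(multi).
import Mathlib
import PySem

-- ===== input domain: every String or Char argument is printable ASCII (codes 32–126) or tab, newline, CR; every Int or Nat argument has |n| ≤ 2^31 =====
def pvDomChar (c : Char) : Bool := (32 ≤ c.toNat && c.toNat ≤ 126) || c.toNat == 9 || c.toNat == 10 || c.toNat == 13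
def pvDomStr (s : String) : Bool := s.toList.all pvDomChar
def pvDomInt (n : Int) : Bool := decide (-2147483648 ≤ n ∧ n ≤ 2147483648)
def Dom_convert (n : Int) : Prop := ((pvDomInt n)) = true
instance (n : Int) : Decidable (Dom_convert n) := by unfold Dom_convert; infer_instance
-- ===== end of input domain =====

-- B replaces A's 10-slot count array + second classification pass by two sets (seen/multi)
-- maintained in the single digit loop; objective: simpler (one pass over the digits, no table).

-- ===== PORT A =====
-- while temp > 0: A[temp % 10] += 1; temp //= 10
def convertLoopA (temp : Int) (A : List Int) : List Int :=
  if 0 < temp then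
    convertLoopA (PySem.Int.floordiv temp 10)
      (PySem.List.pySetD A (PySem.Int.mod temp 10)
        (PySem.List.pyGetD A (PySem.Int.mod temp 10) 0 + 1))
  else A
termination_by temp.toNat
decreasing_by
  rw [PySem.Int.floordiv_eq_ediv_of_pos (by norm_num)]
  omega

def convert (n : Int) : Int × Int × Int :=
  let A := convertLoopA n (List.replicate 10 0)
  let p := A.foldl
    (fun (p : Int × Int) d => if d = 1 then (p.1 + 1, p.2) else if 1 < d then (p.1, p.2 + 1) else p)
    (0, 0)
  (n, p.1, p.2)

-- ===== PORT B =====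
-- while temp > 0: d = temp % 10; if d in seen: multi.add(d) else: seen.add(d); temp //= 10
def convertLoopB (temp : Int) (seen multi : PySem.Set Int) : PySem.Set Int × PySem.Set Int :=
  if 0 < temp then
    let d := PySem.Int.mod temp 10
    if PySem.Set.contains seen d then
      convertLoopB (PySem.Int.floordiv temp 10) seen (PySem.Set.add multi d)
    else
      convertLoopB (PySem.Int.floordiv temp 10) (PySem.Set.add seen d) multi
  else (seen, multi)
termination_by temp.toNat
decreasing_by
  all_goals rw [PySem.Int.floordiv_eq_ediv_of_pos (by norm_num)]
  all_goals omega

def convert_alt (n : Int) : Int × Int × Int :=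
  let p := convertLoopB n PySem.Set.empty PySem.Set.empty
  (n, PySem.Set.len p.1 - PySem.Set.len p.2, PySem.Set.len p.2)

-- ===== PRECONDITION & SPEC =====
def Spec_convert (n : Int) (out : Int × Int × Int) : Prop := out = convert_alt n
instance (n : Int) (out : Int × Int × Int) : Decidable (Spec_convert n out) := by unfold Spec_convert; infer_instance

-- ===== CLAIM (what is proved, stated in full; the proofs are below) =====
def Claim_equal_convert : Prop := ∀ (n : Int), Dom_convert n → Spec_convert n (convert n)

-- ===== LEMMAS AND PROOFS =====

-- The invariant tying A's count array to B's two sets.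
def InvCM (A : List Int) (s m : PySem.Set Int) : Prop :=
  A.length = 10 ∧
  (∀ k : Nat, k < 10 → 0 ≤ A.getD k 0) ∧
  (∀ k : Nat, k < 10 → (((k : Int) ∈ s) ↔ 1 ≤ A.getD k 0)) ∧
  (∀ k : Nat, k < 10 → (((k : Int) ∈ m) ↔ 2 ≤ A.getD k 0)) ∧
  s.length = A.countP (fun x => decide (1 ≤ x)) ∧
  m.length = A.countP (fun x => decide (2 ≤ x))

lemma getD_set_eq (A : List Int) (k j : Nat) (v : Int) (hk : k < A.length) :
    (A.set k v).getD j 0 = if j = k then v else A.getD j 0 := by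
  rw [List.getD_eq_getElem?_getD, List.getD_eq_getElem?_getD, List.getElem?_set]
  by_cases h : j = k
  · subst h; simp [hk]
  · rw [if_neg (fun h' => h h'.symm), if_neg h]

lemma countP_set_add (p : Int → Bool) :
    ∀ (A : List Int) (k : Nat), k < A.length → ∀ v : Int,
      (A.set k v).countP p + (if p (A.getD k 0) then 1 else 0)
        = A.countP p + (if p v then 1 else 0) := by
  intro A
  induction A with
  | nil => intro k hk; simp at hk
  | cons a t ih =>
    intro k hk v
    cases k with
    | zero =>
      simp only [List.set_cons_zero, List.countP_cons, List.getD_cons_zero]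
      split_ifs <;> omega
    | succ k =>
      have := ih k (by simpa using hk) v
      simp only [List.set_cons_succ, List.countP_cons, List.getD_cons_succ]
      split_ifs at this ⊢ <;> omega

lemma countP_one_split (A : List Int) :
    A.countP (fun x => decide (1 ≤ x))
      = A.countP (fun x => decide (x = 1)) + A.countP (fun x => decide (2 ≤ x)) := by
  induction A with
  | nil => simp
  | cons a t ih =>
    simp only [List.countP_cons, ih]
    by_cases h1 : a = 1
    · simp [h1]; omega
    · by_cases h2 : 2 ≤ a
      · have : (1:Int) ≤ a := by omega
        simp [h1, h2, this]; omega
      · have : ¬ (1:Int) ≤ a := by omega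
        simp [h1, h2, this]

lemma classify_fold (A : List Int) : ∀ (a b : Int),
    A.foldl (fun (p : Int × Int) d =>
        if d = 1 then (p.1 + 1, p.2) else if 1 < d then (p.1, p.2 + 1) else p) (a, b)
      = (a + (A.countP (fun x => decide (x = 1)) : Int),
         b + (A.countP (fun x => decide (2 ≤ x)) : Int)) := by
  induction A with
  | nil => intro a b; simp
  | cons d t ih =>
    intro a b
    by_cases h1 : d = 1
    · simp [List.foldl_cons, h1, ih]
      ring
    · by_cases h2 : 1 < d
      · have h2' : (2:Int) ≤ d := by omega
        simp [List.foldl_cons, h1, h2, ih, h2']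
        ring
      · have h2' : ¬ (2:Int) ≤ d := by omega
        simp [List.foldl_cons, h1, h2, ih, h2']

lemma length_add_set (s : PySem.Set Int) (d : Int) :
    (PySem.Set.add s d).length = s.length + (if d ∈ s then 0 else 1) := by
  by_cases h : d ∈ s
  · simp [PySem.Set.add, h]
  · have hc : PySem.Set.contains s d = false := by
      rw [Bool.eq_false_iff]
      intro h'; exact h ((PySem.Set.contains_iff s d).1 h')
    simp [PySem.Set.add, h]

lemma loop_inv : ∀ (fuel : Nat) (temp : Int), temp.toNat ≤ fuel →
    ∀ (A : List Int) (s m : PySem.Set Int), InvCM A s m →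
      InvCM (convertLoopA temp A) (convertLoopB temp s m).1 (convertLoopB temp s m).2 := by
  intro fuel
  induction fuel with
  | zero =>
    intro temp ht A s m hInv
    have htemp : ¬ 0 < temp := by omega
    rw [convertLoopA, convertLoopB]
    simp [htemp, hInv]
  | succ fuel ih =>
    intro temp ht A s m hInv
    by_cases htemp : 0 < temp
    · obtain ⟨hlen, hnn, hs, hm, hls, hlm⟩ := hInv
      set d : Int := PySem.Int.mod temp 10 with hd
      have hd0 : 0 ≤ d := PySem.Int.mod_nonneg temp (by norm_num)
      have hd10 : d < 10 := PySem.Int.mod_lt temp (by norm_num)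
      set k : Nat := d.toNat with hk
      have hdk : d = (k : Int) := by omega
      have hk10 : k < 10 := by omega
      have hkA : k < A.length := by omega
      -- the updated array
      have hget : PySem.List.pyGetD A d 0 = A.getD k 0 := by
        rw [hdk]; simp
      have hsetd : PySem.List.pySetD A d (PySem.List.pyGetD A d 0 + 1)
          = A.set k (A.getD k 0 + 1) := by
        rw [hget, PySem.List.pySetD_of_nonneg A _ hd0, ← hk]
      set c : Int := A.getD k 0 with hc
      set A' : List Int := A.set k (c + 1) with hA'
      have hlen' : A'.length = 10 := by simp [hA', hlen]
      have hgetD' : ∀ j : Nat, (A'.getD j 0) = if j = k then c + 1 else A.getD j 0 := by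
        intro j; exact getD_set_eq A k j (c + 1) hkA
      have hnn' : ∀ j : Nat, j < 10 → 0 ≤ A'.getD j 0 := by
        intro j hj; rw [hgetD']
        by_cases hjk : j = k
        · simp [hjk]; have := hnn k hk10; omega
        · simp [hjk]; exact hnn j hj
      have hcnn : 0 ≤ c := hnn k hk10
      have hcount1 := countP_set_add (fun x => decide (1 ≤ x)) A k hkA (c + 1)
      have hcount2 := countP_set_add (fun x => decide (2 ≤ x)) A k hkA (c + 1)
      rw [← hc, ← hA'] at hcount1 hcount2
      have hfuel : (PySem.Int.floordiv temp 10).toNat ≤ fuel := by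
        rw [PySem.Int.floordiv_eq_ediv_of_pos (by norm_num)]
        omega
      rw [convertLoopA, convertLoopB]
      simp only [htemp, if_true, ← hd, hsetd]
      by_cases hcont : PySem.Set.contains s d = true
      · -- d already seen: A[d] ≥ 1
        have hdmem : d ∈ s := (PySem.Set.contains_iff s d).1 hcont
        have hc1 : 1 ≤ c := (hs k hk10).1 (hdk ▸ hdmem)
        rw [if_pos hcont]
        apply ih _ hfuel
        refine ⟨hlen', hnn', ?_, ?_, ?_, ?_⟩
        · intro j hj; rw [hgetD']
          by_cases hjk : j = k
          · subst hjk; simp; constructor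
            · intro _; omega
            · intro _; exact hdk ▸ hdmem
          · simp [hjk]; exact hs j hj
        · intro j hj; rw [hgetD', PySem.Set.mem_add]
          by_cases hjk : j = k
          · subst hjk; simp [← hdk]; omega
          · have : ((j : Int) = d) = False := by
              simp [hdk]; omega
            simp [hjk, this]; exact hm j hj
        · -- seen unchanged; countP (1 ≤ ·) unchanged
          rw [hls]
          simp only [decide_eq_true_eq] at hcount1
          split_ifs at hcount1 <;> omega
        · -- multi gains d iff A[d] = 1
          rw [length_add_set, hlm]
          simp only [decide_eq_true_eq] at hcount2
          by_cases h2c : 2 ≤ c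
          · have hmemm : d ∈ m := hdk ▸ ((hm k hk10).2 h2c)
            rw [if_pos hmemm]
            split_ifs at hcount2 <;> omega
          · have hmemm : d ∉ m := fun h => h2c ((hm k hk10).1 (hdk ▸ h))
            rw [if_neg hmemm]
            split_ifs at hcount2 <;> omega
      · -- d not seen yet: A[d] = 0
        have hcont' : PySem.Set.contains s d = false := by
          rw [Bool.eq_false_iff]; exact hcont
        have hdmem : d ∉ s := fun h => hcont ((PySem.Set.contains_iff s d).2 h)
        have hc0 : c = 0 := by
          have : ¬ 1 ≤ c := fun h => hdmem (hdk ▸ ((hs k hk10).2 h))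
          omega
        rw [if_neg hcont]
        apply ih _ hfuel
        refine ⟨hlen', hnn', ?_, ?_, ?_, ?_⟩
        · intro j hj; rw [hgetD', PySem.Set.mem_add]
          by_cases hjk : j = k
          · subst hjk; simp [← hdk]; omega
          · have : ((j : Int) = d) = False := by
              simp [hdk]; omega
            simp [hjk, this]; exact hs j hj
        · intro j hj; rw [hgetD']
          by_cases hjk : j = k
          · subst hjk; simp; constructor
            · intro h; exact absurd ((hm k hk10).1 (hdk ▸ h)) (by omega)
            · intro h; omega
          · simp [hjk]; exact hm j hj
        · rw [length_add_set, hls, if_neg hdmem]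
          simp only [decide_eq_true_eq] at hcount1
          split_ifs at hcount1 <;> omega
        · rw [hlm]
          simp only [decide_eq_true_eq] at hcount2
          split_ifs at hcount2 <;> omega
    · rw [convertLoopA, convertLoopB]
      simp [htemp, hInv]

lemma inv_init : InvCM (List.replicate 10 0) PySem.Set.empty PySem.Set.empty := by
  unfold InvCM PySem.Set.empty
  decide

-- ===== VERDICT (by name: the statement is the Claim_ definition above) =====
theorem convert_spec : Claim_equal_convert := by
  unfold Claim_equal_convert Spec_convert
  intro n _
  have h := loop_inv n.toNat n (le_refl _) (List.replicate 10 0)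
    PySem.Set.empty PySem.Set.empty inv_init
  obtain ⟨hlen, hnn, hs, hm, hls, hlm⟩ := h
  unfold convert convert_alt
  simp only [classify_fold, zero_add]
  have hsplit := countP_one_split (convertLoopA n (List.replicate 10 0))
  refine Prod.ext rfl (Prod.ext ?_ ?_)
  · simp only [PySem.Set.len, hls, hlm, hsplit]
    push_cast
    ring
  · simp only [PySem.Set.len, hlm]
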